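-- pv_equiv track=rewrite | github.com/bharatsharma19/MedXtract | utils/normalizer.py | standardize_biomarker_name
-- ===== SOURCE A (Python) =====
-- BIOMARKER_ALIASES = {
--     "Hemoglobin": ["Hb", "HGB", "Haemoglobin", "HB", "Hgb"],
--     "RBC Count": ["Red Blood Cells", "RBC", "Erythrocytes", "Red Cell Count", "RBCs"],
--     "WBC Count": ["White Blood Cells", "WBC", "Leukocytes", "White Cell Count", "WBCs"],
--     "Platelets": ["PLT", "Thrombocytes", "Platelet Count", "PLAT"],
--     "Hematocrit": ["HCT", "PCV", "Packed Cell Volume", "Hct"],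
--     "MCV": ["Mean Corpuscular Volume", "Mean Cell Volume"],
--     "MCH": ["Mean Corpuscular Hemoglobin", "Mean Cell Hemoglobin"],
--     "MCHC": ["Mean Corpuscular Hemoglobin Concentration"],
-- }
--
-- def standardize_biomarker_name(name: str) -> str:
--     name_lower = name.lower().strip()
--     for standard_name, aliases in BIOMARKER_ALIASES.items():
--         if name_lower == standard_name.lower() or name_lower in [
--             alias.lower() for alias in aliases
--         ]:
--             return standard_name
--     return name
-- ===== SOURCE B (Python) =====
-- BIOMARKER_ALIASES = {
--     "Hemoglobin": ["Hb", "HGB", "Haemoglobin", "HB", "Hgb"],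
--     "RBC Count": ["Red Blood Cells", "RBC", "Erythrocytes", "Red Cell Count", "RBCs"],
--     "WBC Count": ["White Blood Cells", "WBC", "Leukocytes", "White Cell Count", "WBCs"],
--     "Platelets": ["PLT", "Thrombocytes", "Platelet Count", "PLAT"],
--     "Hematocrit": ["HCT", "PCV", "Packed Cell Volume", "Hct"],
--     "MCV": ["Mean Corpuscular Volume", "Mean Cell Volume"],
--     "MCH": ["Mean Corpuscular Hemoglobin", "Mean Cell Hemoglobin"],
--     "MCHC": ["Mean Corpuscular Hemoglobin Concentration"],
-- }
--
-- # One-time build: flat (lowercased key, standard name) pairs, ordered by key,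
-- # so lookup is a binary search instead of any scan of the table.
-- _pairs = []
-- for _std, _aliases in BIOMARKER_ALIASES.items():
--     _pairs.append((_std.lower(), _std))
--     for _a in _aliases:
--         _pairs.append((_a.lower(), _std))
-- _PAIRS = sorted(_pairs, key=lambda p: p[0])
--
--
-- def _bsearch(key, default, pairs):
--     if not pairs:
--         return default
--     m = len(pairs) // 2
--     mid_key, std = pairs[m]
--     if key == mid_key:
--         return std
--     if key < mid_key:
--         return _bsearch(key, default, pairs[:m])
--     return _bsearch(key, default, pairs[m + 1:])
--
--
-- def standardize_biomarker_name(name: str) -> str: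
--     return _bsearch(name.lower().strip(), name, _PAIRS)
-- ===== Notes on version B (the rewrite author's own statement) =====
-- stated objective: alternative
-- what changed: A's per-call scan of the nested alias dict (rebuilding a lowered alias list per entry) is replaced by a flat (lowercased key, standard name) pair list sorted once at module load and a recursive binary search by string comparison per call.
import Mathlib
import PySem

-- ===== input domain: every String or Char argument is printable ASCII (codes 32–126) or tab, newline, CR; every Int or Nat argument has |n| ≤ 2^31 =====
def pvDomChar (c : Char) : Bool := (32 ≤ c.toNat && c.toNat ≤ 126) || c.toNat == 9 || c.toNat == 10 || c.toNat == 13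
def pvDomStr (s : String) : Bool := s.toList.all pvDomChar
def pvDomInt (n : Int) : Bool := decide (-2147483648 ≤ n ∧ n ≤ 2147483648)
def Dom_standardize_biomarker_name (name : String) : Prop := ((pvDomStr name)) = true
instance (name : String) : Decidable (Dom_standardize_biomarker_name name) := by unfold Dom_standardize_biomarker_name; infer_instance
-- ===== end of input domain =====

-- B replaces A's per-call scan over the nested alias table by a flat (lowercased key, standard
-- name) pair list sorted once at module load and a recursive binary search per call
-- (objective: alternative algorithm — ordered search instead of a scan).

-- shared module constant BIOMARKER_ALIASES (a dict literal; association list in insertion order)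
def BIOMARKER_ALIASES : List (String × List String) :=
  [ ("Hemoglobin", ["Hb", "HGB", "Haemoglobin", "HB", "Hgb"]),
    ("RBC Count", ["Red Blood Cells", "RBC", "Erythrocytes", "Red Cell Count", "RBCs"]),
    ("WBC Count", ["White Blood Cells", "WBC", "Leukocytes", "White Cell Count", "WBCs"]),
    ("Platelets", ["PLT", "Thrombocytes", "Platelet Count", "PLAT"]),
    ("Hematocrit", ["HCT", "PCV", "Packed Cell Volume", "Hct"]),
    ("MCV", ["Mean Corpuscular Volume", "Mean Cell Volume"]),
    ("MCH", ["Mean Corpuscular Hemoglobin", "Mean Cell Hemoglobin"]),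
    ("MCHC", ["Mean Corpuscular Hemoglobin Concentration"]) ]

-- ===== PORT A =====
-- the for-loop with early return, as structural recursion over the items
def stdA_loop (name_lower name : String) : List (String × List String) → String
  | [] => name
  | (standard_name, aliases) :: rest =>
    if name_lower == PySem.Str.lower standard_name
        || (aliases.map PySem.Str.lower).contains name_lower then
      standard_name
    else
      stdA_loop name_lower name rest

def standardize_biomarker_name (name : String) : String :=
  stdA_loop (PySem.Str.strip (PySem.Str.lower name)) name BIOMARKER_ALIASES

-- ===== PORT B =====
-- Source B's module-load build loop: flat (lowered key, standard name) pairs, then sorted by key.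
-- Python's str '<' (used by sorted and the search) is lexicographic by code point, which is
-- exactly List Char '<' on .toList — so key comparisons are ported through .toList (exact).
def pvPAIRS : List (String × String) :=
  PySem.List.sorted
    (BIOMARKER_ALIASES.foldl
      (fun ps p => p.2.foldl (fun ps a => ps ++ [(PySem.Str.lower a, p.1)])
                    (ps ++ [(PySem.Str.lower p.1, p.1)]))
      [])
    (fun p => p.1.toList) false

-- Source B's _bsearch: recursive binary search on the sorted pair list (pairs[:m] / pairs[m+1:]);
-- the fuel argument (initially the list length) only totalizes the same recursion
def pvBsearchGo (key default : String) : Nat → List (String × String) → String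
  | 0, _ => default
  | _+1, [] => default
  | fuel+1, x :: xs =>
    if key == ((x :: xs).getD ((x :: xs).length / 2) x).1 then
      ((x :: xs).getD ((x :: xs).length / 2) x).2
    else if key.toList < ((x :: xs).getD ((x :: xs).length / 2) x).1.toList then
      pvBsearchGo key default fuel ((x :: xs).take ((x :: xs).length / 2))
    else
      pvBsearchGo key default fuel ((x :: xs).drop ((x :: xs).length / 2 + 1))

def pvBsearch (key default : String) (l : List (String × String)) : String :=
  pvBsearchGo key default l.length l

def standardize_biomarker_name_alt (name : String) : String :=
  pvBsearch (PySem.Str.strip (PySem.Str.lower name)) name pvPAIRS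

-- ===== PRECONDITION & SPEC =====
def Spec_standardize_biomarker_name (name : String) (out : String) : Prop := out = standardize_biomarker_name_alt name
instance (name : String) (out : String) : Decidable (Spec_standardize_biomarker_name name out) := by unfold Spec_standardize_biomarker_name; infer_instance

-- ===== CLAIM =====
def Claim_equal_standardize_biomarker_name : Prop := ∀ (name : String), Dom_standardize_biomarker_name name → Spec_standardize_biomarker_name name (standardize_biomarker_name name)

-- ===== LEMMAS AND PROOFS =====

-- the pivot pairs[m] (getD with an in-list default) is an element of the list
theorem getD_cons_mem {α : Type} (x : α) (xs : List α) (n : Nat) : (x :: xs).getD n x ∈ x :: xs := by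
  rcases h : (x :: xs)[n]? with _ | a
  · simp [List.getD, h]
  · simp [List.getD, h]
    exact List.mem_cons.mp (List.mem_of_getElem? h)

-- a key absent from the pair list is never found by the binary search (any fuel)
theorem pvBsearchGo_notMem (key default : String) : ∀ (fuel : Nat) (l : List (String × String)),
    key ∉ l.map Prod.fst → pvBsearchGo key default fuel l = default := by
  intro fuel
  induction fuel with
  | zero => intro l _; rfl
  | succ n ih =>
    intro l h
    match l with
    | [] => rfl
    | x :: xs =>
      simp only [pvBsearchGo]
      have hpm := getD_cons_mem x xs ((x :: xs).length / 2)
      split_ifs with h1 h2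
      · exact absurd (eq_of_beq h1 ▸ List.mem_map_of_mem (f := Prod.fst) hpm) h
      · exact ih _ (fun hm => h (by
          obtain ⟨p, hp, hk⟩ := List.mem_map.mp hm
          exact List.mem_map.mpr ⟨p, List.take_subset _ _ hp, hk⟩))
      · exact ih _ (fun hm => h (by
          obtain ⟨p, hp, hk⟩ := List.mem_map.mp hm
          exact List.mem_map.mpr ⟨p, List.drop_subset _ _ hp, hk⟩))

-- For every key k, A's scan over the table and B's binary search of the flat sorted pairs agree:
-- case split over the 33 distinct lowercased keys of the table; off the table both return `name`.
set_option maxRecDepth 100000 in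
set_option maxHeartbeats 2000000 in
theorem stdA_loop_eq_bsearch (k name : String) :
    stdA_loop k name BIOMARKER_ALIASES = pvBsearch k name pvPAIRS := by
  by_cases h0 : k = "hemoglobin"
  · subst h0; rfl
  by_cases h1 : k = "hb"
  · subst h1; rfl
  by_cases h2 : k = "hgb"
  · subst h2; rfl
  by_cases h3 : k = "haemoglobin"
  · subst h3; rfl
  by_cases h4 : k = "rbc count"
  · subst h4; rfl
  by_cases h5 : k = "red blood cells"
  · subst h5; rfl
  by_cases h6 : k = "rbc"
  · subst h6; rfl
  by_cases h7 : k = "erythrocytes"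
  · subst h7; rfl
  by_cases h8 : k = "red cell count"
  · subst h8; rfl
  by_cases h9 : k = "rbcs"
  · subst h9; rfl
  by_cases h10 : k = "wbc count"
  · subst h10; rfl
  by_cases h11 : k = "white blood cells"
  · subst h11; rfl
  by_cases h12 : k = "wbc"
  · subst h12; rfl
  by_cases h13 : k = "leukocytes"
  · subst h13; rfl
  by_cases h14 : k = "white cell count"
  · subst h14; rfl
  by_cases h15 : k = "wbcs"
  · subst h15; rfl
  by_cases h16 : k = "platelets"
  · subst h16; rfl
  by_cases h17 : k = "plt"
  · subst h17; rfl
  by_cases h18 : k = "thrombocytes"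
  · subst h18; rfl
  by_cases h19 : k = "platelet count"
  · subst h19; rfl
  by_cases h20 : k = "plat"
  · subst h20; rfl
  by_cases h21 : k = "hematocrit"
  · subst h21; rfl
  by_cases h22 : k = "hct"
  · subst h22; rfl
  by_cases h23 : k = "pcv"
  · subst h23; rfl
  by_cases h24 : k = "packed cell volume"
  · subst h24; rfl
  by_cases h25 : k = "mcv"
  · subst h25; rfl
  by_cases h26 : k = "mean corpuscular volume"
  · subst h26; rfl
  by_cases h27 : k = "mean cell volume"
  · subst h27; rfl
  by_cases h28 : k = "mch"
  · subst h28; rfl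
  by_cases h29 : k = "mean corpuscular hemoglobin"
  · subst h29; rfl
  by_cases h30 : k = "mean cell hemoglobin"
  · subst h30; rfl
  by_cases h31 : k = "mchc"
  · subst h31; rfl
  by_cases h32 : k = "mean corpuscular hemoglobin concentration"
  · subst h32; rfl
  have hnot : k ∉ pvPAIRS.map Prod.fst := by
    have hP : pvPAIRS.map Prod.fst =
      ["erythrocytes", "haemoglobin", "hb", "hb", "hct", "hct", "hematocrit", "hemoglobin",
       "hgb", "hgb", "leukocytes", "mch", "mchc", "mcv", "mean cell hemoglobin",
       "mean cell volume", "mean corpuscular hemoglobin",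
       "mean corpuscular hemoglobin concentration", "mean corpuscular volume",
       "packed cell volume", "pcv", "plat", "platelet count", "platelets", "plt", "rbc",
       "rbc count", "rbcs", "red blood cells", "red cell count", "thrombocytes", "wbc",
       "wbc count", "wbcs", "white blood cells", "white cell count"] := by decide
    rw [hP]
    simp [h0, h1, h2, h3, h4, h5, h6, h7, h8, h9, h10, h11, h12, h13, h14, h15, h16, h17, h18,
      h19, h20, h21, h22, h23, h24, h25, h26, h27, h28, h29, h30, h31, h32]
  rw [show pvBsearch k name pvPAIRS = pvBsearchGo k name pvPAIRS.length pvPAIRS from rfl,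
      pvBsearchGo_notMem k name pvPAIRS.length pvPAIRS hnot]
  simp [stdA_loop, BIOMARKER_ALIASES,
        show PySem.Str.lower "Hemoglobin" = "hemoglobin" from rfl,
        show PySem.Str.lower "Hb" = "hb" from rfl,
        show PySem.Str.lower "HGB" = "hgb" from rfl,
        show PySem.Str.lower "Haemoglobin" = "haemoglobin" from rfl,
        show PySem.Str.lower "HB" = "hb" from rfl,
        show PySem.Str.lower "Hgb" = "hgb" from rfl,
        show PySem.Str.lower "RBC Count" = "rbc count" from rfl,
        show PySem.Str.lower "Red Blood Cells" = "red blood cells" from rfl,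
        show PySem.Str.lower "RBC" = "rbc" from rfl,
        show PySem.Str.lower "Erythrocytes" = "erythrocytes" from rfl,
        show PySem.Str.lower "Red Cell Count" = "red cell count" from rfl,
        show PySem.Str.lower "RBCs" = "rbcs" from rfl,
        show PySem.Str.lower "WBC Count" = "wbc count" from rfl,
        show PySem.Str.lower "White Blood Cells" = "white blood cells" from rfl,
        show PySem.Str.lower "WBC" = "wbc" from rfl,
        show PySem.Str.lower "Leukocytes" = "leukocytes" from rfl,
        show PySem.Str.lower "White Cell Count" = "white cell count" from rfl,
        show PySem.Str.lower "WBCs" = "wbcs" from rfl,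
        show PySem.Str.lower "Platelets" = "platelets" from rfl,
        show PySem.Str.lower "PLT" = "plt" from rfl,
        show PySem.Str.lower "Thrombocytes" = "thrombocytes" from rfl,
        show PySem.Str.lower "Platelet Count" = "platelet count" from rfl,
        show PySem.Str.lower "PLAT" = "plat" from rfl,
        show PySem.Str.lower "Hematocrit" = "hematocrit" from rfl,
        show PySem.Str.lower "HCT" = "hct" from rfl,
        show PySem.Str.lower "PCV" = "pcv" from rfl,
        show PySem.Str.lower "Packed Cell Volume" = "packed cell volume" from rfl,
        show PySem.Str.lower "Hct" = "hct" from rfl,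
        show PySem.Str.lower "MCV" = "mcv" from rfl,
        show PySem.Str.lower "Mean Corpuscular Volume" = "mean corpuscular volume" from rfl,
        show PySem.Str.lower "Mean Cell Volume" = "mean cell volume" from rfl,
        show PySem.Str.lower "MCH" = "mch" from rfl,
        show PySem.Str.lower "Mean Corpuscular Hemoglobin" = "mean corpuscular hemoglobin" from rfl,
        show PySem.Str.lower "Mean Cell Hemoglobin" = "mean cell hemoglobin" from rfl,
        show PySem.Str.lower "MCHC" = "mchc" from rfl,
        show PySem.Str.lower "Mean Corpuscular Hemoglobin Concentration" = "mean corpuscular hemoglobin concentration" from rfl,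
        h0, h1, h2, h3, h4, h5, h6, h7, h8, h9, h10, h11, h12, h13, h14, h15, h16, h17, h18,
        h19, h20, h21, h22, h23, h24, h25, h26, h27, h28, h29, h30, h31, h32]

-- ===== VERDICT =====
theorem standardize_biomarker_name_spec : Claim_equal_standardize_biomarker_name := by
  intro name _
  unfold Spec_standardize_biomarker_name standardize_biomarker_name standardize_biomarker_name_alt
  exact stdA_loop_eq_bsearch _ name
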